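-- pv_equiv track=rewrite | github.com/beedev/codeloom | codeloom/core/migration/context_builder.py | _format_mvp_cross_edges
-- ===== SOURCE A (Python) =====
-- from typing import Any, Dict, List, Optional
--
-- def _format_mvp_cross_edges(edges: List[Dict]) -> str:
--     """Format edges crossing the MVP boundary."""
--     if not edges:
--         return "## MVP Boundary Edges\nNo cross-boundary edges found."
--     lines = ["## MVP Boundary Edges (Blast Radius)"]
--
--     inbound = [e for e in edges if e.get("direction") == "inbound"]
--     outbound = [e for e in edges if e.get("direction") == "outbound"]
--     internal = [e for e in edges if e.get("direction") == "internal"]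
--
--     if internal:
--         lines.append(f"\n**Internal edges**: {len(internal)}")
--         for e in internal[:10]:
--             lines.append(f"  - {e['source']} --[{e['edge_type']}]--> {e['target']}")
--
--     if outbound:
--         lines.append(f"\n**Outbound edges** (MVP depends on external): {len(outbound)}")
--         for e in outbound[:15]:
--             lines.append(f"  - {e['source']} --[{e['edge_type']}]--> {e['target']}")
--
--     if inbound:
--         lines.append(f"\n**Inbound edges** (external depends on MVP): {len(inbound)}")
--         for e in inbound[:15]:
--             lines.append(f"  - {e['source']} --[{e['edge_type']}]--> {e['target']}")
--
--     return "\n".join(lines)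
-- ===== SOURCE B (Python) =====
-- _HEADERS = ["\n**Internal edges**: ",
--             "\n**Outbound edges** (MVP depends on external): ",
--             "\n**Inbound edges** (external depends on MVP): "]
-- _CAPS = [10, 15, 15]
--
-- def _rank(e):
--     return {"internal": 0, "outbound": 1, "inbound": 2}.get(e.get("direction"), 3)
--
-- def _format_mvp_cross_edges(edges):
--     """Format edges crossing the MVP boundary (stable sort by section rank, then one group scan)."""
--     if not edges:
--         return "## MVP Boundary Edges\nNo cross-boundary edges found."
--     lines = ["## MVP Boundary Edges (Blast Radius)"]
--     rest = sorted(edges, key=_rank)   # stable: keeps input order inside each section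
--     while rest:
--         r = _rank(rest[0])
--         k = 0
--         while k < len(rest) and _rank(rest[k]) == r:
--             k += 1
--         group, rest = rest[:k], rest[k:]
--         if r < 3:
--             lines.append(_HEADERS[r] + str(len(group)))
--             lines += ["  - {} --[{}]--> {}".format(e['source'], e['edge_type'], e['target'])
--                       for e in group[:_CAPS[r]]]
--     return "\n".join(lines)
-- ===== Notes on version B (the rewrite author's own statement) =====
-- stated objective: alternative
-- what changed: Replaces A's three independent filter passes and three copy-pasted if-blocks by a stable sort of the edges by section rank followed by a single group scan that emits each section as the rank changes.
import Mathlib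
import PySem

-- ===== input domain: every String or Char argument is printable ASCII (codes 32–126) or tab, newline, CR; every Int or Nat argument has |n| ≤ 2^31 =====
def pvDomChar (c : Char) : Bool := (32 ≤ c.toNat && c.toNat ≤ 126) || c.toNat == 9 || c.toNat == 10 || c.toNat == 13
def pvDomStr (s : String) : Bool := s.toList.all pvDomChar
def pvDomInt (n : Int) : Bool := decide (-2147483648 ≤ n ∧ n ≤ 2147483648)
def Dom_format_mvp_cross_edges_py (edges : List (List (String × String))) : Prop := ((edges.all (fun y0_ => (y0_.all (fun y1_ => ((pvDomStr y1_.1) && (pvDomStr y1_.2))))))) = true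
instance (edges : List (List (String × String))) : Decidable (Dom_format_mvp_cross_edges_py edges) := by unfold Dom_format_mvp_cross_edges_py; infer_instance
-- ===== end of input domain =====

-- B replaces A's three filter passes and three copy-pasted if-blocks by a stable sort of
-- the edges by section rank followed by a single group scan; alternative decomposition.

-- ===== PORT A =====
-- dict.get(k) on an association list: first match (also A's e['source'] etc.; under
-- Pre_ the keys are present, so .getD "" never supplies the default inside Pre_)
def pvGetA (e : List (String × String)) (k : String) : Option String :=
  (e.find? (fun kv => kv.1 == k)).map (·.2)

def pvFmtA (e : List (String × String)) : String :=
  "  - " ++ ((pvGetA e "source").getD "") ++ " --[" ++ ((pvGetA e "edge_type").getD "") ++ "]--> " ++ ((pvGetA e "target").getD "")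

def format_mvp_cross_edges_py (edges : List (List (String × String))) : String :=
  if edges.isEmpty then "## MVP Boundary Edges\nNo cross-boundary edges found."
  else
    let lines : List String := ["## MVP Boundary Edges (Blast Radius)"]
    let inbound := edges.filter (fun e => pvGetA e "direction" == some "inbound")
    let outbound := edges.filter (fun e => pvGetA e "direction" == some "outbound")
    let internal := edges.filter (fun e => pvGetA e "direction" == some "internal")
    let lines := if internal.isEmpty then lines else
      lines ++ ["\n**Internal edges**: " ++ PySem.Int.toStr internal.length] ++ (internal.take 10).map pvFmtA
    let lines := if outbound.isEmpty then lines else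
      lines ++ ["\n**Outbound edges** (MVP depends on external): " ++ PySem.Int.toStr outbound.length] ++ (outbound.take 15).map pvFmtA
    let lines := if inbound.isEmpty then lines else
      lines ++ ["\n**Inbound edges** (external depends on MVP): " ++ PySem.Int.toStr inbound.length] ++ (inbound.take 15).map pvFmtA
    PySem.Str.join "\n" lines

-- ===== PORT B =====
def pvGetB (e : List (String × String)) (k : String) : Option String :=
  (e.find? (fun kv => kv.1 == k)).map (·.2)

def pvFmtB (e : List (String × String)) : String :=
  "  - " ++ ((pvGetB e "source").getD "") ++ " --[" ++ ((pvGetB e "edge_type").getD "") ++ "]--> " ++ ((pvGetB e "target").getD "")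

def pvHeaders : List String :=
  ["\n**Internal edges**: ",
   "\n**Outbound edges** (MVP depends on external): ",
   "\n**Inbound edges** (external depends on MVP): "]

def pvCaps : List Nat := [10, 15, 15]

-- _rank: section rank of an edge (internal 0, outbound 1, inbound 2, other 3)
def pvRank (e : List (String × String)) : Int :=
  if pvGetB e "direction" == some "internal" then 0
  else if pvGetB e "direction" == some "outbound" then 1
  else if pvGetB e "direction" == some "inbound" then 2
  else 3

-- the while-loop over the sorted list: peel one maximal same-rank group per step
def pvScan (rest : List (List (String × String))) : List String :=
  match h : rest with
  | [] => []
  | e :: _ =>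
    let r := pvRank e
    let group := rest.takeWhile (fun x => pvRank x == r)
    let rest' := rest.dropWhile (fun x => pvRank x == r)
    (if r < 3 then
        [pvHeaders.getD r.toNat "" ++ PySem.Int.toStr group.length] ++
          (group.take (pvCaps.getD r.toNat 0)).map pvFmtB
      else []) ++ pvScan rest'
termination_by rest.length
decreasing_by
  simp only [h, List.dropWhile]
  have hb : (pvRank e == pvRank e) = true := by simp
  simp only [hb]
  simp
  exact List.length_dropWhile_le _ _

def format_mvp_cross_edges_py_alt (edges : List (List (String × String))) : String :=
  if edges.isEmpty then "## MVP Boundary Edges\nNo cross-boundary edges found."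
  else
    PySem.Str.join "\n"
      (["## MVP Boundary Edges (Blast Radius)"] ++ pvScan (PySem.List.sorted edges pvRank))

-- ===== PRECONDITION & SPEC =====
def pvHasKeys (e : List (String × String)) : Prop :=
  (pvGetA e "source").isSome ∧ (pvGetA e "edge_type").isSome ∧ (pvGetA e "target").isSome

-- Pre_ excludes exactly the inputs on which Python A raises KeyError: a displayed edge
-- (within its section's cap) missing 'source', 'edge_type' or 'target'.
def Pre_format_mvp_cross_edges_py (edges : List (List (String × String))) : Prop :=
  (∀ e ∈ (edges.filter (fun e => pvGetA e "direction" == some "internal")).take 10, pvHasKeys e) ∧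
  (∀ e ∈ (edges.filter (fun e => pvGetA e "direction" == some "outbound")).take 15, pvHasKeys e) ∧
  (∀ e ∈ (edges.filter (fun e => pvGetA e "direction" == some "inbound")).take 15, pvHasKeys e)

instance (edges : List (List (String × String))) : Decidable (Pre_format_mvp_cross_edges_py edges) := by
  unfold Pre_format_mvp_cross_edges_py pvHasKeys; infer_instance

def pvWitness_format_mvp_cross_edges_py : (List (List (String × String))) :=
  [[("direction", "inbound"), ("source", "a"), ("edge_type", "uses"), ("target", "b")]]

def Spec_format_mvp_cross_edges_py (edges : List (List (String × String))) (out : String) : Prop := out = format_mvp_cross_edges_py_alt edges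
instance (edges : List (List (String × String))) (out : String) : Decidable (Spec_format_mvp_cross_edges_py edges out) := by unfold Spec_format_mvp_cross_edges_py; infer_instance

-- ===== CLAIM (what is proved, stated in full; the proofs are below) =====
def Claim_equal_format_mvp_cross_edges_py : Prop := ∀ (edges : List (List (String × String))), Dom_format_mvp_cross_edges_py edges → Pre_format_mvp_cross_edges_py edges → Spec_format_mvp_cross_edges_py edges (format_mvp_cross_edges_py edges)

-- ===== LEMMAS AND PROOFS =====

-- insertBy skips a prefix it must not go before
theorem pvInsertBy_append {α : Type} (before : α → α → Bool) (x : α) (l1 l2 : List α)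
    (h : ∀ y ∈ l1, before x y = false) :
    PySem.List.insertBy before x (l1 ++ l2) = l1 ++ PySem.List.insertBy before x l2 := by
  induction l1 with
  | nil => simp
  | cons y ys ih =>
    have hy := h y (by simp)
    simp [PySem.List.insertBy, hy]
    exact ih (fun z hz => h z (by simp [hz]))

-- insertBy lands at the front of a block it goes before
theorem pvInsertBy_front {α : Type} (before : α → α → Bool) (x : α) (l : List α)
    (h : ∀ y ∈ l, before x y = true) :
    PySem.List.insertBy before x l = x :: l := by
  cases l with
  | nil => rfl
  | cons y ys => simp [PySem.List.insertBy, h y (by simp)]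

-- the insertion-sort fold keeps the four rank groups concatenated in rank order
theorem pvSortFold (l : List (List (String × String)))
    (g0 g1 g2 g3 : List (List (String × String)))
    (h0 : ∀ e ∈ g0, pvRank e = 0) (h1 : ∀ e ∈ g1, pvRank e = 1)
    (h2 : ∀ e ∈ g2, pvRank e = 2) (h3 : ∀ e ∈ g3, pvRank e = 3) :
    l.foldl (fun acc x => PySem.List.insertBy (fun a b => decide (pvRank a < pvRank b)) x acc)
        (g0 ++ g1 ++ g2 ++ g3) =
      (g0 ++ l.filter (fun e => pvRank e == 0)) ++ (g1 ++ l.filter (fun e => pvRank e == 1)) ++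
      (g2 ++ l.filter (fun e => pvRank e == 2)) ++ (g3 ++ l.filter (fun e => pvRank e == 3)) := by
  induction l generalizing g0 g1 g2 g3 with
  | nil => simp
  | cons e t ih =>
    have hr : pvRank e = 0 ∨ pvRank e = 1 ∨ pvRank e = 2 ∨ pvRank e = 3 := by
      unfold pvRank; split_ifs <;> simp
    simp only [List.foldl_cons]
    rcases hr with hr | hr | hr | hr
    · have : PySem.List.insertBy (fun a b => decide (pvRank a < pvRank b)) e (g0 ++ g1 ++ g2 ++ g3)
          = (g0 ++ [e]) ++ g1 ++ g2 ++ g3 := by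
        rw [show g0 ++ g1 ++ g2 ++ g3 = g0 ++ (g1 ++ g2 ++ g3) by simp,
            pvInsertBy_append _ _ _ _ (by intro y hy; simp [h0 y hy, hr]),
            pvInsertBy_front _ _ _ (by
              intro y hy
              simp only [List.mem_append] at hy
              rcases hy with (hy | hy) | hy
              · simp [h1 y hy, hr]
              · simp [h2 y hy, hr]
              · simp [h3 y hy, hr])]
        simp
      rw [this, ih (g0 ++ [e]) g1 g2 g3
        (by intro x hx; rcases List.mem_append.1 hx with hx | hx
            · exact h0 x hx
            · simp only [List.mem_singleton] at hx; subst hx; exact hr)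
        h1 h2 h3]
      simp [hr]
    · have : PySem.List.insertBy (fun a b => decide (pvRank a < pvRank b)) e (g0 ++ g1 ++ g2 ++ g3)
          = g0 ++ (g1 ++ [e]) ++ g2 ++ g3 := by
        rw [show g0 ++ g1 ++ g2 ++ g3 = (g0 ++ g1) ++ (g2 ++ g3) by simp,
            pvInsertBy_append _ _ _ _ (by
              intro y hy
              rcases List.mem_append.1 hy with hy | hy
              · simp [h0 y hy, hr]
              · simp [h1 y hy, hr]),
            pvInsertBy_front _ _ _ (by
              intro y hy
              rcases List.mem_append.1 hy with hy | hy
              · simp [h2 y hy, hr]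
              · simp [h3 y hy, hr])]
        simp
      rw [this, ih g0 (g1 ++ [e]) g2 g3 h0
        (by intro x hx; rcases List.mem_append.1 hx with hx | hx
            · exact h1 x hx
            · simp only [List.mem_singleton] at hx; subst hx; exact hr)
        h2 h3]
      simp [hr]
    · have : PySem.List.insertBy (fun a b => decide (pvRank a < pvRank b)) e (g0 ++ g1 ++ g2 ++ g3)
          = g0 ++ g1 ++ (g2 ++ [e]) ++ g3 := by
        rw [show g0 ++ g1 ++ g2 ++ g3 = (g0 ++ g1 ++ g2) ++ g3 by simp,
            pvInsertBy_append _ _ _ _ (by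
              intro y hy
              simp only [List.mem_append] at hy
              rcases hy with (hy | hy) | hy
              · simp [h0 y hy, hr]
              · simp [h1 y hy, hr]
              · simp [h2 y hy, hr]),
            pvInsertBy_front _ _ _ (by intro y hy; simp [h3 y hy, hr])]
        simp
      rw [this, ih g0 g1 (g2 ++ [e]) g3 h0 h1
        (by intro x hx; rcases List.mem_append.1 hx with hx | hx
            · exact h2 x hx
            · simp only [List.mem_singleton] at hx; subst hx; exact hr)
        h3]
      simp [hr]
    · have : PySem.List.insertBy (fun a b => decide (pvRank a < pvRank b)) e (g0 ++ g1 ++ g2 ++ g3)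
          = g0 ++ g1 ++ g2 ++ (g3 ++ [e]) := by
        rw [show g0 ++ g1 ++ g2 ++ g3 = (g0 ++ g1 ++ g2 ++ g3) ++ [] by simp,
            pvInsertBy_append _ _ _ _ (by
              intro y hy
              simp only [List.mem_append] at hy
              rcases hy with ((hy | hy) | hy) | hy
              · simp [h0 y hy, hr]
              · simp [h1 y hy, hr]
              · simp [h2 y hy, hr]
              · simp [h3 y hy, hr])]
        simp [PySem.List.insertBy]
      rw [this, ih g0 g1 g2 (g3 ++ [e]) h0 h1 h2
        (by intro x hx; rcases List.mem_append.1 hx with hx | hx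
            · exact h3 x hx
            · simp only [List.mem_singleton] at hx; subst hx; exact hr)]
      simp [hr]

-- the stable sort by rank is the concatenation of the four rank filters
theorem pvSorted_eq (edges : List (List (String × String))) :
    PySem.List.sorted edges pvRank =
      edges.filter (fun e => pvRank e == 0) ++ edges.filter (fun e => pvRank e == 1) ++
      edges.filter (fun e => pvRank e == 2) ++ edges.filter (fun e => pvRank e == 3) := by
  have := pvSortFold edges [] [] [] [] (by simp) (by simp) (by simp) (by simp)
  simpa [PySem.List.sorted] using this

-- one step of the group scan helpers
theorem pvTakeWhile_all_append {a : Type} (p : a -> Bool) (l1 l2 : List a)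
    (h : forall x, x ∈ l1 -> p x = true) :
    (l1 ++ l2).takeWhile p = l1 ++ l2.takeWhile p := by
  induction l1 with
  | nil => simp
  | cons y ys ih =>
    simp [h y (by simp)]
    exact ih (fun z hz => h z (by simp [hz]))

theorem pvDropWhile_all_append {a : Type} (p : a -> Bool) (l1 l2 : List a)
    (h : forall x, x ∈ l1 -> p x = true) :
    (l1 ++ l2).dropWhile p = l2.dropWhile p := by
  induction l1 with
  | nil => simp
  | cons y ys ih =>
    simp [h y (by simp)]
    exact ih (fun z hz => h z (by simp [hz]))

-- one section of the report, as the scan emits it (empty group emits nothing)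
def pvSec (r : Int) (g : List (List (String × String))) : List String :=
  if g = [] then []
  else if r < 3 then
    [pvHeaders.getD r.toNat "" ++ PySem.Int.toStr g.length] ++
      (g.take (pvCaps.getD r.toNat 0)).map pvFmtB
  else []

-- one step of the group scan
theorem pvScan_step (r : Int) (g rest : List (List (String × String)))
    (hg : g ≠ []) (hgr : forall e, e ∈ g -> pvRank e = r)
    (hrest : forall e, e ∈ rest -> pvRank e ≠ r) :
    pvScan (g ++ rest) = pvSec r g ++ pvScan rest := by
  cases g with
  | nil => exact absurd rfl hg
  | cons e g' =>
    have he : pvRank e = r := hgr e (by simp)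
    have htake : ((e :: g') ++ rest).takeWhile (fun x => pvRank x == r) = e :: g' := by
      rw [pvTakeWhile_all_append _ _ _ (fun x hx => by simp [hgr x hx])]
      have hnil : rest.takeWhile (fun x => pvRank x == r) = [] := by
        cases hr : rest with
        | nil => rfl
        | cons b bs =>
          have hb : (pvRank b == r) = false := by
            simp; exact hrest b (by simp [hr])
          simp [List.takeWhile, hb]
      simp [hnil]
    have hdrop : ((e :: g') ++ rest).dropWhile (fun x => pvRank x == r) = rest := by
      rw [pvDropWhile_all_append _ _ _ (fun x hx => by simp [hgr x hx])]
      cases hr : rest with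
      | nil => rfl
      | cons b bs =>
        have hb : (pvRank b == r) = false := by
          simp; exact hrest b (by simp [hr])
        simp [List.dropWhile, hb]
    show pvScan (e :: (g' ++ rest)) = _
    rw [pvScan.eq_def]
    simp only [he, ← List.cons_append, htake, hdrop, pvSec]
    simp

theorem pvScan_nil : pvScan [] = [] := by rw [pvScan.eq_def]

theorem pvScan3 (f3 : List (List (String × String)))
    (h3 : forall e, e ∈ f3 -> pvRank e = 3) : pvScan f3 = [] := by
  by_cases h : f3 = []
  · subst h; exact pvScan_nil
  · have hstep := pvScan_step 3 f3 [] h h3 (by simp)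
    simp only [List.append_nil, pvScan_nil] at hstep
    rw [hstep]
    simp [pvSec, h]

theorem pvScan2 (f2 f3 : List (List (String × String)))
    (h2 : forall e, e ∈ f2 -> pvRank e = 2) (h3 : forall e, e ∈ f3 -> pvRank e = 3) :
    pvScan (f2 ++ f3) = pvSec 2 f2 := by
  by_cases h : f2 = []
  · subst h
    simp only [List.nil_append]
    rw [pvScan3 f3 h3]
    simp [pvSec]
  · rw [pvScan_step 2 f2 f3 h h2 (fun e he => by simp [h3 e he]), pvScan3 f3 h3]
    simp

theorem pvScan1 (f1 f2 f3 : List (List (String × String)))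
    (h1 : forall e, e ∈ f1 -> pvRank e = 1) (h2 : forall e, e ∈ f2 -> pvRank e = 2)
    (h3 : forall e, e ∈ f3 -> pvRank e = 3) :
    pvScan (f1 ++ f2 ++ f3) = pvSec 1 f1 ++ pvSec 2 f2 := by
  by_cases h : f1 = []
  · subst h
    simp only [List.nil_append]
    rw [pvScan2 f2 f3 h2 h3]
    simp [pvSec]
  · rw [List.append_assoc, pvScan_step 1 f1 (f2 ++ f3) h h1 (fun e he => by
      rcases List.mem_append.1 he with he | he
      · simp [h2 e he]
      · simp [h3 e he]), pvScan2 f2 f3 h2 h3]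

theorem pvScan0 (f0 f1 f2 f3 : List (List (String × String)))
    (h0 : forall e, e ∈ f0 -> pvRank e = 0) (h1 : forall e, e ∈ f1 -> pvRank e = 1)
    (h2 : forall e, e ∈ f2 -> pvRank e = 2) (h3 : forall e, e ∈ f3 -> pvRank e = 3) :
    pvScan (f0 ++ f1 ++ f2 ++ f3) = pvSec 0 f0 ++ pvSec 1 f1 ++ pvSec 2 f2 := by
  by_cases h : f0 = []
  · subst h
    simp only [List.nil_append]
    rw [pvScan1 f1 f2 f3 h1 h2 h3]
    simp [pvSec]
  · rw [List.append_assoc, List.append_assoc, pvScan_step 0 f0 (f1 ++ (f2 ++ f3)) h h0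
      (fun e he => by
        rcases List.mem_append.1 he with he | he
        · simp [h1 e he]
        · rcases List.mem_append.1 he with he | he
          · simp [h2 e he]
          · simp [h3 e he]), ← List.append_assoc, pvScan1 f1 f2 f3 h1 h2 h3]
    simp

-- rank 0/1/2 name exactly A\'s three direction filters
theorem pvRank_eq_zero_iff (e : List (String × String)) :
    (pvRank e == 0) = (pvGetA e "direction" == some "internal") := by
  show (pvRank e == 0) = (pvGetB e "direction" == some "internal")
  unfold pvRank; split_ifs <;> simp_all

theorem pvRank_eq_one_iff (e : List (String × String)) :
    (pvRank e == 1) = (pvGetA e "direction" == some "outbound") := by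
  show (pvRank e == 1) = (pvGetB e "direction" == some "outbound")
  unfold pvRank; split_ifs <;> simp_all

theorem pvRank_eq_two_iff (e : List (String × String)) :
    (pvRank e == 2) = (pvGetA e "direction" == some "inbound") := by
  show (pvRank e == 2) = (pvGetB e "direction" == some "inbound")
  unfold pvRank; split_ifs <;> simp_all

-- ===== VERDICT (by name: the statement is the Claim_ definition above) =====
theorem format_mvp_cross_edges_py_spec : Claim_equal_format_mvp_cross_edges_py := by
  intro edges _ _
  show format_mvp_cross_edges_py edges = format_mvp_cross_edges_py_alt edges
  unfold format_mvp_cross_edges_py format_mvp_cross_edges_py_alt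
  by_cases h : edges.isEmpty
  · simp [h]
  · simp only [h]
    rw [pvSorted_eq]
    rw [pvScan0 _ _ _ _
      (fun e he => by have := (List.mem_filter.1 he).2; simpa using this)
      (fun e he => by have := (List.mem_filter.1 he).2; simpa using this)
      (fun e he => by have := (List.mem_filter.1 he).2; simpa using this)
      (fun e he => by have := (List.mem_filter.1 he).2; simpa using this)]
    simp only [pvSec, pvRank_eq_zero_iff, pvRank_eq_one_iff, pvRank_eq_two_iff]
    have hfmt : pvFmtB = pvFmtA := rfl
    by_cases c0 : edges.filter (fun e => pvGetA e "direction" == some "internal") = [] <;>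
    by_cases c1 : edges.filter (fun e => pvGetA e "direction" == some "outbound") = [] <;>
    by_cases c2 : edges.filter (fun e => pvGetA e "direction" == some "inbound") = [] <;>
      simp [c0, c1, c2, hfmt, List.isEmpty_iff, pvHeaders, pvCaps]
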